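-- pv_equiv track=rewrite | github.com/vipinsaini27/DSAlgo | Day 45 - String Algorithms/Boring substring.py | solve
-- ===== SOURCE A (Python) =====
-- def solve(A):
--     odd = []
--     even = []
--
--     for i in range(len(A)):
--         val = ord(A[i])
--         if val%2 == 0:
--             even.append(val)
--         else:
--             odd.append(val)
--
--     odd = sorted(odd)
--     even = sorted(even)
--
--     if len(even) == 0 or len(odd) == 0:
--         return 1
--     elif abs(even[-1] - odd[0]) != 1:
--         return 1
--     elif abs(odd[-1] - even[0]) != 1:
--         return 1
--
--     return 0
-- ===== SOURCE B (Python) =====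
-- def solve(A):
--     mno = mxo = mne = mxe = None
--     for ch in A:
--         v = ord(ch)
--         if v % 2 == 1:
--             if mno is None:
--                 mno = mxo = v
--             else:
--                 if v < mno:
--                     mno = v
--                 if v > mxo:
--                     mxo = v
--         else:
--             if mne is None:
--                 mne = mxe = v
--             else:
--                 if v < mne:
--                     mne = v
--                 if v > mxe:
--                     mxe = v
--     if mno is None or mne is None:
--         return 1
--     if abs(mxe - mno) == 1 and abs(mxo - mne) == 1:
--         return 0
--     return 1
-- ===== Notes on version B (the rewrite author's own statement) =====
-- stated objective: faster
-- what changed: Replaces the build-two-lists-then-sort-and-index approach with a single pass that tracks only the min and max of the odd-code and even-code groups, so no intermediate lists and no sorting.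
import Mathlib
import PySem

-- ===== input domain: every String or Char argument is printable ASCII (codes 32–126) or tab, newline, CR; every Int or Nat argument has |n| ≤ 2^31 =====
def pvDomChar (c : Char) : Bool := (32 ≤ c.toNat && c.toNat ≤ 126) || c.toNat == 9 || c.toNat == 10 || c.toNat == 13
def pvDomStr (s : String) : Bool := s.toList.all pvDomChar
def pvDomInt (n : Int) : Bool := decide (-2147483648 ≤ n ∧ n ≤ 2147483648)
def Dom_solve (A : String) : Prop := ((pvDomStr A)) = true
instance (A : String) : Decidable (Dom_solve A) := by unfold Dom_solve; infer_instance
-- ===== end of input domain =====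

-- B: one pass tracking min/max of the odd-code and even-code groups instead of building and sorting two lists.

-- ===== PORT A =====
def solve (A : String) : Int :=
  let cs := A.toList
  let oe := (PySem.List.pyRange 0 (cs.length : Int) 1).foldl
      (fun (p : List Int × List Int) i =>
        let val : Int := ((PySem.List.pyGetD cs i ' ').toNat : Int)
        if PySem.Int.mod val 2 = 0 then (p.1, p.2 ++ [val]) else (p.1 ++ [val], p.2))
      ([], [])
  let odd := PySem.List.sorted oe.1 (fun x => x) false
  let even := PySem.List.sorted oe.2 (fun x => x) false
  if even.length = 0 ∨ odd.length = 0 then 1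
  else if |PySem.List.pyGetD even (-1) 0 - PySem.List.pyGetD odd 0 0| ≠ 1 then 1
  else if |PySem.List.pyGetD odd (-1) 0 - PySem.List.pyGetD even 0 0| ≠ 1 then 1
  else 0

-- ===== PORT B =====
-- update one (min, max) register with a new value (None → first value)
def mmAdd (s : Option (Int × Int)) (v : Int) : Option (Int × Int) :=
  match s with
  | none => some (v, v)
  | some (mn, mx) => some (if v < mn then v else mn, if v > mx then v else mx)

def solve_alt (A : String) : Int :=
  let st := A.toList.foldl
      (fun (s : Option (Int × Int) × Option (Int × Int)) c =>
        let v : Int := (c.toNat : Int)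
        if v % 2 = 1 then (mmAdd s.1 v, s.2) else (s.1, mmAdd s.2 v))
      (none, none)
  match st.1, st.2 with
  | some (mno, mxo), some (mne, mxe) =>
      if |mxe - mno| = 1 ∧ |mxo - mne| = 1 then 0 else 1
  | _, _ => 1

-- ===== PRECONDITION & SPEC =====
def Spec_solve (A : String) (out : Int) : Prop := out = solve_alt A
instance (A : String) (out : Int) : Decidable (Spec_solve A out) := by unfold Spec_solve; infer_instance

-- ===== CLAIM (what is proved, stated in full; the proofs are below) =====
def Claim_equal_solve : Prop := ∀ (A : String), Dom_solve A → Spec_solve A (solve A)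

-- ===== LEMMAS AND PROOFS =====

def oddsOf : List Char → List Int
  | [] => []
  | c :: t => if (c.toNat : Int) % 2 = 1 then (c.toNat : Int) :: oddsOf t else oddsOf t

def evensOf : List Char → List Int
  | [] => []
  | c :: t => if (c.toNat : Int) % 2 = 1 then evensOf t else (c.toNat : Int) :: evensOf t

lemma pymod_two (v : Int) : PySem.Int.mod v 2 = v % 2 :=
  PySem.Int.mod_eq_emod_of_pos (by norm_num)

lemma foldA (cs : List Char) (o e : List Int) :
    cs.foldl (fun (p : List Int × List Int) c =>
        let val : Int := ((c.toNat : Int))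
        if PySem.Int.mod val 2 = 0 then (p.1, p.2 ++ [val]) else (p.1 ++ [val], p.2))
      (o, e) = (o ++ oddsOf cs, e ++ evensOf cs) := by
  induction cs generalizing o e with
  | nil => simp [oddsOf, evensOf]
  | cons c t ih =>
    simp only [List.foldl_cons]
    by_cases h : (c.toNat : Int) % 2 = 1
    · rw [show (if PySem.Int.mod (c.toNat : Int) 2 = 0 then (o, e ++ [(c.toNat : Int)])
          else (o ++ [(c.toNat : Int)], e)) = (o ++ [(c.toNat : Int)], e) by
        rw [if_neg]; rw [pymod_two]; omega]
      rw [ih, oddsOf, evensOf, if_pos h, if_pos h]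
      simp
    · rw [show (if PySem.Int.mod (c.toNat : Int) 2 = 0 then (o, e ++ [(c.toNat : Int)])
          else (o ++ [(c.toNat : Int)], e)) = (o, e ++ [(c.toNat : Int)]) by
        rw [if_pos]; rw [pymod_two]; omega]
      rw [ih, oddsOf, evensOf, if_neg h, if_neg h]
      simp

lemma foldB (cs : List Char) (s t : Option (Int × Int)) :
    cs.foldl (fun (p : Option (Int × Int) × Option (Int × Int)) c =>
        let v : Int := (c.toNat : Int)
        if v % 2 = 1 then (mmAdd p.1 v, p.2) else (p.1, mmAdd p.2 v))
      (s, t) = ((oddsOf cs).foldl mmAdd s, (evensOf cs).foldl mmAdd t) := by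
  induction cs generalizing s t with
  | nil => simp [oddsOf, evensOf]
  | cons c u ih =>
    simp only [List.foldl_cons]
    by_cases h : (c.toNat : Int) % 2 = 1
    · rw [if_pos h, ih, oddsOf, evensOf, if_pos h, if_pos h]
      simp
    · rw [if_neg h, ih, oddsOf, evensOf, if_neg h, if_neg h]
      simp

lemma mm_spec (t : List Int) (a b : Int) :
    ∃ mn mx, t.foldl mmAdd (some (a, b)) = some (mn, mx) ∧
      (mn = a ∨ mn ∈ t) ∧ (mx = b ∨ mx ∈ t) ∧ mn ≤ a ∧ b ≤ mx ∧
      (∀ x ∈ t, mn ≤ x ∧ x ≤ mx) := by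
  induction t generalizing a b with
  | nil => exact ⟨a, b, rfl, Or.inl rfl, Or.inl rfl, le_refl _, le_refl _, by simp⟩
  | cons v u ih =>
    simp only [List.foldl_cons, mmAdd]
    obtain ⟨mn, mx, heq, hmn, hmx, hle, hge, hall⟩ :=
      ih (if v < a then v else a) (if v > b then v else b)
    refine ⟨mn, mx, heq, ?_, ?_, ?_, ?_, ?_⟩
    · rcases hmn with hc | hc
      · by_cases hv : v < a
        · right; simp [hc, hv]
        · left; simp [hc, hv]
      · right; exact List.mem_cons_of_mem _ hc
    · rcases hmx with hc | hc
      · by_cases hv : v > b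
        · right; simp [hc, hv]
        · left; simp [hc, hv]
      · right; exact List.mem_cons_of_mem _ hc
    · split_ifs at hle <;> omega
    · split_ifs at hge <;> omega
    · intro x hx
      rcases List.mem_cons.mp hx with hc | hc
      · subst hc
        refine ⟨le_trans hle ?_, le_trans ?_ hge⟩
        · split_ifs <;> omega
        · split_ifs <;> omega
      · exact hall x hc

-- the full min/max characterisation of the B-side fold on a nonempty list
lemma mm_char (v : Int) (t : List Int) :
    ∃ mn mx, (v :: t).foldl mmAdd none = some (mn, mx) ∧ mn ∈ v :: t ∧ mx ∈ v :: t ∧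
      (∀ x ∈ v :: t, mn ≤ x ∧ x ≤ mx) := by
  have hstep : (v :: t).foldl mmAdd none = t.foldl mmAdd (some (v, v)) := rfl
  obtain ⟨mn, mx, heq, hmn, hmx, hle, hge, hall⟩ := mm_spec t v v
  refine ⟨mn, mx, hstep.trans heq, ?_, ?_, ?_⟩
  · rcases hmn with hc | hc
    · simp [hc]
    · exact List.mem_cons_of_mem _ hc
  · rcases hmx with hc | hc
    · simp [hc]
    · exact List.mem_cons_of_mem _ hc
  · intro x hx
    rcases List.mem_cons.mp hx with hc | hc
    · subst hc; exact ⟨hle, hge⟩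
    · exact hall x hc

lemma pairwise_le_getLast (l : List Int) (hp : l.Pairwise (· ≤ ·)) (hne : l ≠ [])
    (x : Int) (hx : x ∈ l) : x ≤ l.getLast hne := by
  induction l with
  | nil => cases hx
  | cons a t ih =>
    rcases List.pairwise_cons.mp hp with ⟨ha, hp'⟩
    cases t with
    | nil =>
      simp at hx; simp [hx, List.getLast]
    | cons b u =>
      rw [List.getLast_cons (by simp)]
      rcases List.mem_cons.mp hx with hc | hc
      · subst hc; exact ha _ (List.getLast_mem _)
      · exact ih hp' (by simp) hc

-- head and last of sorted l are the min and the max of l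
lemma sorted_head_min (l : List Int) (hne : l ≠ []) :
    ∃ h t, PySem.List.sorted l (fun x => x) false = h :: t ∧ h ∈ l ∧ ∀ y ∈ l, h ≤ y := by
  have hsne : PySem.List.sorted l (fun x => x) false ≠ [] := by
    simp [PySem.List.sorted_eq_nil_iff, hne]
  obtain ⟨h, t, heq⟩ := List.exists_cons_of_ne_nil hsne
  refine ⟨h, t, heq, ?_, ?_⟩
  · exact (PySem.List.mem_sorted l _ false h).mp (by rw [heq]; exact List.mem_cons_self)
  · exact PySem.List.key_head_sorted_le l (fun x => x) heq

lemma sorted_last_max (l : List Int) (hne : l ≠ []) :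
    ∃ (hs : PySem.List.sorted l (fun x => x) false ≠ []),
      (PySem.List.sorted l (fun x => x) false).getLast hs ∈ l ∧
      ∀ y ∈ l, y ≤ (PySem.List.sorted l (fun x => x) false).getLast hs := by
  have hsne : PySem.List.sorted l (fun x => x) false ≠ [] := by
    simp [PySem.List.sorted_eq_nil_iff, hne]
  refine ⟨hsne, ?_, ?_⟩
  · exact (PySem.List.mem_sorted l _ false _).mp (List.getLast_mem hsne)
  · intro y hy
    exact pairwise_le_getLast _ (PySem.List.sorted_pairwise l (fun x => x)) hsne y
      ((PySem.List.mem_sorted l _ false y).mpr hy)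

lemma extremal_unique_min (l : List Int) (m1 m2 : Int) (h1 : m1 ∈ l) (h2 : m2 ∈ l)
    (g1 : ∀ x ∈ l, m1 ≤ x) (g2 : ∀ x ∈ l, m2 ≤ x) : m1 = m2 :=
  le_antisymm (g1 m2 h2) (g2 m1 h1)

lemma extremal_unique_max (l : List Int) (m1 m2 : Int) (h1 : m1 ∈ l) (h2 : m2 ∈ l)
    (g1 : ∀ x ∈ l, x ≤ m1) (g2 : ∀ x ∈ l, x ≤ m2) : m1 = m2 :=
  le_antisymm (g2 m1 h1) (g1 m2 h2)

-- ===== VERDICT (by name: the statement is the Claim_ definition above) =====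
theorem solve_spec : Claim_equal_solve := by
  intro A _
  simp only [Spec_solve, solve, solve_alt]
  rw [PySem.List.foldl_pyRange_zero_pyGetD' A.toList ' '
    (fun (p : List Int × List Int) c =>
        let val : Int := ((c.toNat : Int))
        if PySem.Int.mod val 2 = 0 then (p.1, p.2 ++ [val]) else (p.1 ++ [val], p.2))
    ([], [])]
  rw [foldA A.toList [] [], foldB A.toList none none]
  simp only [List.nil_append]
  set cs := A.toList with hcs
  cases ho : oddsOf cs with
  | nil =>
    -- no odd codes: A's odd list is empty, B's odd register is none
    simp
  | cons vo t_o =>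
    cases he : evensOf cs with
    | nil =>
      obtain ⟨mn, mx, heq, _, _, _⟩ := mm_char vo t_o
      rw [heq]
      simp
    | cons ve t_e =>
      obtain ⟨mno, mxo, heqo, hmno, hmxo, hallo⟩ := mm_char vo t_o
      obtain ⟨mne, mxe, heqe, hmne, hmxe, halle⟩ := mm_char ve t_e
      rw [heqo, heqe]
      obtain ⟨h1, t1, hsorto, hho_mem, hho_min⟩ := sorted_head_min (vo :: t_o) (by simp)
      obtain ⟨h2, t2, hsorte, hhe_mem, hhe_min⟩ := sorted_head_min (ve :: t_e) (by simp)
      obtain ⟨hsno, hlo_mem, hlo_max⟩ := sorted_last_max (vo :: t_o) (by simp)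
      obtain ⟨hsne, hle_mem, hle_max⟩ := sorted_last_max (ve :: t_e) (by simp)
      -- identify the four extremal values
      have e1 : PySem.List.pyGetD (PySem.List.sorted (vo :: t_o) (fun x => x) false) 0 0 = mno := by
        rw [hsorto, PySem.List.pyGetD_zero_cons]
        exact extremal_unique_min (vo :: t_o) h1 mno hho_mem hmno hho_min
          (fun x hx => (hallo x hx).1)
      have e2 : PySem.List.pyGetD (PySem.List.sorted (ve :: t_e) (fun x => x) false) 0 0 = mne := by
        rw [hsorte, PySem.List.pyGetD_zero_cons]
        exact extremal_unique_min (ve :: t_e) h2 mne hhe_mem hmne hhe_min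
          (fun x hx => (halle x hx).1)
      have e3 : PySem.List.pyGetD (PySem.List.sorted (vo :: t_o) (fun x => x) false) (-1) 0 = mxo := by
        rw [PySem.List.pyGetD_neg_one _ _ hsno]
        exact extremal_unique_max (vo :: t_o) _ mxo hlo_mem hmxo hlo_max
          (fun x hx => (hallo x hx).2)
      have e4 : PySem.List.pyGetD (PySem.List.sorted (ve :: t_e) (fun x => x) false) (-1) 0 = mxe := by
        rw [PySem.List.pyGetD_neg_one _ _ hsne]
        exact extremal_unique_max (ve :: t_e) _ mxe hle_mem hmxe hle_max
          (fun x hx => (halle x hx).2)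
      simp only [e1, e2, e3, e4]
      have hlen_e : ¬ ((PySem.List.sorted (ve :: t_e) (fun x => x) false).length = 0 ∨
          (PySem.List.sorted (vo :: t_o) (fun x => x) false).length = 0) := by
        simp [PySem.List.length_sorted]
      rw [if_neg hlen_e]
      by_cases c1 : |mxe - mno| = 1
      · by_cases c2 : |mxo - mne| = 1
        · simp [c1, c2]
        · simp [c1, c2]
      · simp [c1]
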